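-- pv_equiv track=rewrite | github.com/Sanacd/unimate_subsystem | flask/app.py | expand_equivalents
-- ===== SOURCE A (Python) =====
-- def expand_equivalents(courses: set, mapping: dict) -> set:
--     """
--     Expand course slots based on equivalence map.
--     Example input: {"GIAS221"} → {"GIAS221","GIASXXX","GHALXXX"}
--     """
--     expanded = set(courses)
--
--     for code in list(courses):
--         for slot, equivalents in mapping.items():
--             if code == slot or code in equivalents:
--                 expanded.add(slot)
--                 expanded.update(equivalents)
--
--     return expanded
-- ===== SOURCE B (Python) =====
-- def expand_equivalents(courses: set, mapping: dict) -> set: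
--     """
--     Expand course slots via a reverse index: one pass over the mapping builds
--     member -> concatenation of all groups (slot + equivalents) containing it,
--     then each course is expanded by a single O(1) lookup.
--     """
--     rev = {}
--     for slot, equivalents in mapping.items():
--         group = [slot, *equivalents]
--         for member in dict.fromkeys(group):
--             rev.setdefault(member, []).extend(group)
--
--     expanded = set(courses)
--     for code in list(courses):
--         expanded.update(rev.get(code, []))
--     return expanded
-- ===== Notes on version B (the rewrite author's own statement) =====
-- stated objective: faster
-- what changed: Replaces the nested scan of the whole mapping per course by a reverse index member->groups built once, so each course is expanded by a single dictionary lookup.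
import Mathlib
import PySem

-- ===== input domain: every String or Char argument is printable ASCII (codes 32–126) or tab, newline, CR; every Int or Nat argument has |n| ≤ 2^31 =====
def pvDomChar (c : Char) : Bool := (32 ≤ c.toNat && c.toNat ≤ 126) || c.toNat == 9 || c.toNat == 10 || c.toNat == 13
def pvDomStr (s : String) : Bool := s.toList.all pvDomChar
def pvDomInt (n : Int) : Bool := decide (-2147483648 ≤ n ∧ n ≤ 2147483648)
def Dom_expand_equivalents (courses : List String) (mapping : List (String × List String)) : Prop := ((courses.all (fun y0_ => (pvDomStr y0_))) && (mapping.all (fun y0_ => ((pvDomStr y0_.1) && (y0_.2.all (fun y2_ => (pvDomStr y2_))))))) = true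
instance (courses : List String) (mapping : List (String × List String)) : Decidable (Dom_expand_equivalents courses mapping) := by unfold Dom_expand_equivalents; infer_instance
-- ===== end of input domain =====

-- B replaces A's per-course scan of the whole mapping by a reverse index (member → groups)
-- built once, so each course is expanded by a single dictionary lookup (objective: faster).

-- ===== PORT A =====
-- expanded = set(courses); for code in list(courses): for slot, equivalents in mapping.items():
--   if code == slot or code in equivalents: expanded.add(slot); expanded.update(equivalents)
def expand_equivalents (courses : List String) (mapping : List (String × List String)) : List String :=
  let expanded : PySem.Set String := PySem.Set.ofList courses
  courses.foldl (fun expanded code =>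
    mapping.foldl (fun expanded se =>
      if code == se.1 || se.2.contains code then
        PySem.Set.update (PySem.Set.add expanded se.1) se.2
      else expanded) expanded) expanded

-- ===== PORT B =====
-- rev = {}; for slot, equivalents in mapping.items():
--   group = [slot, *equivalents]
--   for member in dict.fromkeys(group): rev.setdefault(member, []).extend(group)
-- (setdefault(m, []).extend(group) ≡ rev[m] = rev.get(m, []) ++ group, i.e. Dict.modify)
def pvBuildRev (mapping : List (String × List String)) : PySem.Dict String (List String) :=
  mapping.foldl (fun rev se =>
    (PySem.List.dedup (se.1 :: se.2)).foldl
      (fun rev m => rev.modify m [] (fun v => v ++ (se.1 :: se.2))) rev)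
    PySem.Dict.empty

-- expanded = set(courses); for code in list(courses): expanded.update(rev.get(code, []))
def expand_equivalents_alt (courses : List String) (mapping : List (String × List String)) : List String :=
  let rev := pvBuildRev mapping
  let expanded : PySem.Set String := PySem.Set.ofList courses
  courses.foldl (fun expanded code =>
    PySem.Set.update expanded (rev.getD code [])) expanded

-- ===== PRECONDITION & SPEC =====
def Spec_expand_equivalents (courses : List String) (mapping : List (String × List String)) (out : List String) : Prop := out = expand_equivalents_alt courses mapping
instance (courses : List String) (mapping : List (String × List String)) (out : List String) : Decidable (Spec_expand_equivalents courses mapping out) := by unfold Spec_expand_equivalents; infer_instance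

-- ===== CLAIM (what is proved, stated in full; the proofs are below) =====
def Claim_equal_expand_equivalents : Prop := ∀ (courses : List String) (mapping : List (String × List String)), Dom_expand_equivalents courses mapping → Spec_expand_equivalents courses mapping (expand_equivalents courses mapping)

-- ===== LEMMAS AND PROOFS =====

-- the concatenation, in mapping order, of the groups (slot :: equivalents) whose entry matches code
def pvGroups (code : String) (mapping : List (String × List String)) : List String :=
  (mapping.filter (fun se => code == se.1 || se.2.contains code)).flatMap (fun se => se.1 :: se.2)

-- B's inner build loop: appending `group` at each key of a Nodup key list, seen from key `code`
lemma inner_getD (code : String) (group : List String) :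
  ∀ (g : List String) (d : PySem.Dict String (List String)), g.Nodup →
    (g.foldl (fun d m => d.modify m [] (fun v => v ++ group)) d).getD code [] =
      d.getD code [] ++ (if code ∈ g then group else []) := by
  intro g
  induction g with
  | nil => intro d _; simp
  | cons m g ih =>
    intro d hnd
    simp only [List.foldl_cons]
    rw [ih _ (List.Nodup.of_cons hnd)]
    by_cases h : code = m
    · subst h
      have hng : code ∉ g := (List.nodup_cons.mp hnd).1
      simp [hng, PySem.Dict.getD_modify_self]
    · simp [PySem.Dict.getD_modify, h, List.mem_cons]

-- the reverse index, looked up at code, is exactly the concatenation of code's matching groups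
lemma buildRev_getD (code : String) :
  ∀ (mapping : List (String × List String)) (d : PySem.Dict String (List String)),
    (mapping.foldl (fun rev se =>
      (PySem.List.dedup (se.1 :: se.2)).foldl
        (fun rev m => rev.modify m [] (fun v => v ++ (se.1 :: se.2))) rev) d).getD code [] =
    d.getD code [] ++ pvGroups code mapping := by
  intro mapping
  induction mapping with
  | nil => intro d; simp [pvGroups]
  | cons se rest ih =>
    intro d
    simp only [List.foldl_cons]
    rw [ih]
    rw [inner_getD code _ _ _ (PySem.List.nodup_dedup _)]
    have hmem : (code ∈ PySem.List.dedup (se.1 :: se.2)) ↔ (code == se.1 || se.2.contains code) = true := by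
      simp [List.mem_cons]
    by_cases hc : (code == se.1 || se.2.contains code) = true
    · have hcp : code = se.1 ∨ code ∈ se.2 := by simpa using hc
      simp [pvGroups, hcp, List.append_assoc]
    · have hcn : ¬ (code = se.1 ∨ code ∈ se.2) := by simpa using hc
      have hnm : code ∉ PySem.List.dedup (se.1 :: se.2) := fun h => hc (hmem.mp h)
      simp [pvGroups, hcn]

-- A's inner loop over the mapping equals one Set.update with code's matching groups
lemma per_code (code : String) :
  ∀ (mapping : List (String × List String)) (exp : PySem.Set String),
    mapping.foldl (fun exp se =>
      if code == se.1 || se.2.contains code then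
        PySem.Set.update (PySem.Set.add exp se.1) se.2
      else exp) exp = PySem.Set.update exp (pvGroups code mapping) := by
  intro mapping
  induction mapping with
  | nil => intro exp; simp [pvGroups, PySem.Set.update_nil]
  | cons se rest ih =>
    intro exp
    simp only [List.foldl_cons]
    rw [ih]
    by_cases hc : (code == se.1 || se.2.contains code) = true
    · have hcp : code = se.1 ∨ code ∈ se.2 := by simpa using hc
      simp only [hc, if_true]
      rw [show pvGroups code (se :: rest) = (se.1 :: se.2) ++ pvGroups code rest by
            simp [pvGroups, hcp]]
      rw [PySem.Set.update_append, PySem.Set.update_cons]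
    · have hcn : ¬ (code = se.1 ∨ code ∈ se.2) := by simpa using hc
      simp only [hc]
      congr 1
      simp [pvGroups, hcn]

-- ===== VERDICT (by name: the statement is the Claim_ definition above) =====
theorem expand_equivalents_spec : Claim_equal_expand_equivalents := by
  intro courses mapping _
  unfold Spec_expand_equivalents
  unfold expand_equivalents expand_equivalents_alt pvBuildRev
  have hfun : (fun (expanded : PySem.Set String) (code : String) =>
      mapping.foldl (fun expanded se =>
        if code == se.1 || se.2.contains code then
          PySem.Set.update (PySem.Set.add expanded se.1) se.2
        else expanded) expanded)
    = (fun (expanded : PySem.Set String) (code : String) =>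
      PySem.Set.update expanded ((mapping.foldl (fun rev se =>
        (PySem.List.dedup (se.1 :: se.2)).foldl
          (fun rev m => rev.modify m [] (fun v => v ++ (se.1 :: se.2))) rev)
        PySem.Dict.empty).getD code [])) := by
    funext exp code
    rw [per_code, buildRev_getD code mapping PySem.Dict.empty]
    simp [PySem.Dict.getD_empty]
  rw [hfun]
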